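-- pv_equiv track=rewrite | github.com/damfle/rkllm_openai | rkllm_openai/commons/response_generators.py | _separate_printable_and_nonprintable
-- ===== SOURCE A (Python) =====
-- from typing import TYPE_CHECKING, List, Tuple
--
-- def _separate_printable_and_nonprintable(text: str) -> List[Tuple[str, bool]]:
--     """
--     Separate text into printable and non-printable character groups.
--
--     Args:
--         text: Input text to separate
--
--     Returns:
--         List of tuples (text_chunk, is_printable) where is_printable indicates
--         if the chunk contains only printable characters (excluding whitespace)
--     """
--     if not text:
--         return []
--
--     chunks = []
--     current_chunk = ""
--     current_is_printable = None
--
--     for char in text: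
--         # Whitespace and control characters are non-printable
--         char_is_printable = not char.isspace() and char.isprintable()
--
--         if current_is_printable is None:
--             current_is_printable = char_is_printable
--             current_chunk = char
--         elif current_is_printable == char_is_printable:
--             current_chunk += char
--         else:
--             # Transition between printable and non-printable
--             if current_chunk:
--                 chunks.append((current_chunk, current_is_printable))
--             current_chunk = char
--             current_is_printable = char_is_printable
--
--     # Add the last chunk
--     if current_chunk:
--         chunks.append((current_chunk, current_is_printable))
--
--     return chunks
-- ===== SOURCE B (Python) =====
-- from typing import List, Tuple
--
-- def _separate_printable_and_nonprintable(text: str) -> List[Tuple[str, bool]]: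
--     """Build the chunk list back-to-front: scan text right-to-left, and either
--     prepend the character to the leading chunk of the result (same key) or
--     push a fresh one-character chunk at the front."""
--     res: List[Tuple[str, bool]] = []
--     for ch in reversed(text):
--         k = (not ch.isspace()) and ch.isprintable()
--         if res and res[0][1] == k:
--             res[0] = (ch + res[0][0], k)
--         else:
--             res.insert(0, (ch, k))
--     return res
-- ===== Notes on version B (the rewrite author's own statement) =====
-- stated objective: alternative
-- what changed: Replaces A's forward state machine (current-chunk accumulator, None sentinel, transition branch, final flush) with a right-to-left scan that builds the output list back-to-front, either prepending the character to the leading chunk or pushing a new one-character chunk; no separate current-chunk state or trailing flush exists.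
import Mathlib
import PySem

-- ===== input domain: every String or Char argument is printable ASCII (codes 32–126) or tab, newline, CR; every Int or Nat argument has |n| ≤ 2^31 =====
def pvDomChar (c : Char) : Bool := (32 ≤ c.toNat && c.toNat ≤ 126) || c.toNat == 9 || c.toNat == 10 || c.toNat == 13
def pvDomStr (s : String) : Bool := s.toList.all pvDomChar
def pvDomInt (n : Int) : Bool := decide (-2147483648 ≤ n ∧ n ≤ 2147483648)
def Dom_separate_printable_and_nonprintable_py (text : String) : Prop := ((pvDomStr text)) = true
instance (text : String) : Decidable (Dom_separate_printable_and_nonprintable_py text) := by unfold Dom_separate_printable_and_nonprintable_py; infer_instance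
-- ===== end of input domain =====

-- B builds the chunk list back-to-front: a right-to-left scan that prepends each character to the
-- leading chunk (same key) or pushes a new one, with no sentinel/flush state (alternative).

-- ===== PORT A =====
-- hand port of `c.isprintable()`: exact on the input domain's characters (printable ASCII 32..126
-- are printable; tab/newline/CR are not)
def pvPrintableChar (c : Char) : Bool := 32 ≤ c.toNat && c.toNat ≤ 126

-- `char_is_printable = not char.isspace() and char.isprintable()` (A's and B's per-char key)
def pvCharKey (c : Char) : Bool := !(PySem.Chars.isspace c) && pvPrintableChar c

-- one iteration of A's for-loop; state = (chunks, current_chunk, current_is_printable)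
def pvStepA (s : List (String × Bool) × List Char × Option Bool) (c : Char) :
    List (String × Bool) × List Char × Option Bool :=
  let k := pvCharKey c
  match s with
  | (chunks, _, none) => (chunks, [c], some k)
  | (chunks, curr, some p) =>
    if p == k then (chunks, curr ++ [c], some p)
    else ((if curr ≠ [] then chunks ++ [(String.ofList curr, p)] else chunks), [c], some k)

-- A's trailing `if current_chunk: chunks.append(...)`; `.getD false` is unreachable:
-- current_is_printable is None only while current_chunk is empty
def pvFinA (s : List (String × Bool) × List Char × Option Bool) : List (String × Bool) :=
  match s with
  | (chunks, curr, p) => if curr ≠ [] then chunks ++ [(String.ofList curr, p.getD false)] else chunks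

def separate_printable_and_nonprintable_py (text : String) : List (String × Bool) :=
  if text.toList = [] then []          -- `if not text: return []`
  else pvFinA (text.toList.foldl pvStepA ([], [], none))

-- ===== PORT B =====
-- one iteration of B's loop over reversed(text): merge into the leading chunk or push a new one
def pvStepB (acc : List (String × Bool)) (c : Char) : List (String × Bool) :=
  let k := pvCharKey c
  match acc with
  | (s, kk) :: rest =>
    if kk == k then (String.ofList (c :: s.toList), k) :: rest    -- res[0] = (ch + res[0][0], k)
    else (String.ofList [c], k) :: (s, kk) :: rest                -- res.insert(0, (ch, k))
  | [] => [(String.ofList [c], k)]                                -- res empty: insert at front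

-- `for ch in reversed(text)` = a left fold over the reversed character list
def separate_printable_and_nonprintable_py_alt (text : String) : List (String × Bool) :=
  text.toList.reverse.foldl pvStepB []

-- ===== PRECONDITION & SPEC =====
def Spec_separate_printable_and_nonprintable_py (text : String) (out : List (String × Bool)) : Prop := out = separate_printable_and_nonprintable_py_alt text
instance (text : String) (out : List (String × Bool)) : Decidable (Spec_separate_printable_and_nonprintable_py text out) := by unfold Spec_separate_printable_and_nonprintable_py; infer_instance

-- ===== CLAIM (what is proved, stated in full; the proofs are below) =====
def Claim_equal_separate_printable_and_nonprintable_py : Prop := ∀ (text : String), Dom_separate_printable_and_nonprintable_py text → Spec_separate_printable_and_nonprintable_py text (separate_printable_and_nonprintable_py text)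

-- ===== LEMMAS AND PROOFS =====

-- canonical decomposition into maximal runs of equal key: both ports reduce to this
def pvGroupBy (key : Char → Bool) : List Char → List (List Char)
  | [] => []
  | c :: cs =>
    (c :: cs.takeWhile (fun d => key d == key c))
      :: pvGroupBy key (cs.dropWhile (fun d => key d == key c))
termination_by l => l.length
decreasing_by simpa using Nat.lt_succ_of_le (List.length_dropWhile_le _ _)

def pvEmit (g : List Char) : String × Bool := (String.ofList g, pvCharKey (g.headD ' '))

def pvG (l : List Char) : List (String × Bool) := (pvGroupBy pvCharKey l).map pvEmit

lemma pvBeqComm (a b : Bool) : (a == b) = (b == a) := by cases a <;> cases b <;> rfl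

lemma pvGroupBy_nil (key : Char → Bool) : pvGroupBy key [] = [] := by rw [pvGroupBy]

lemma pvG_nil : pvG [] = [] := by simp [pvG, pvGroupBy_nil]

lemma pvG_cons (c : Char) (cs : List Char) :
    pvG (c :: cs) =
      (String.ofList (c :: cs.takeWhile (fun d => pvCharKey d == pvCharKey c)), pvCharKey c)
        :: pvG (cs.dropWhile (fun d => pvCharKey d == pvCharKey c)) := by
  rw [pvG, pvGroupBy, List.map_cons]; rfl

-- A-side: runs emitted while scanning forward from state (curr, p)
def pvRuns (p : Bool) (curr : List Char) : List Char → List (String × Bool)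
  | [] => [(String.ofList curr, p)]
  | c :: cs =>
    if p == pvCharKey c then pvRuns p (curr ++ [c]) cs
    else (String.ofList curr, p) :: pvRuns (pvCharKey c) [c] cs

lemma pvA_loop (cs : List Char) : ∀ (chunks : List (String × Bool)) (curr : List Char) (p : Bool),
    curr ≠ [] →
    pvFinA (cs.foldl pvStepA (chunks, curr, some p)) = chunks ++ pvRuns p curr cs := by
  induction cs with
  | nil => intro chunks curr p h; simp [pvFinA, pvRuns, h]
  | cons c cs ih =>
    intro chunks curr p h
    by_cases hpk : p == pvCharKey c
    · simp [List.foldl_cons, pvStepA, hpk, pvRuns,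
        ih chunks (curr ++ [c]) p (by simp)]
    · simp [List.foldl_cons, pvStepA, hpk, pvRuns, h,
        ih (chunks ++ [(String.ofList curr, p)]) [c] (pvCharKey c) (by simp)]

lemma pvRuns_eq_groupBy (cs : List Char) : ∀ (curr : List Char) (p : Bool),
    pvRuns p curr cs =
      (String.ofList (curr ++ cs.takeWhile (fun d => p == pvCharKey d)), p)
        :: pvG (cs.dropWhile (fun d => p == pvCharKey d)) := by
  induction cs with
  | nil => intro curr p; simp [pvRuns, pvG_nil]
  | cons c cs ih =>
    intro curr p
    by_cases hpk : p == pvCharKey c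
    · rw [pvRuns, if_pos hpk, ih (curr ++ [c]) p]
      simp [hpk]
    · rw [pvRuns, if_neg hpk, ih [c] (pvCharKey c)]
      have hfun : (fun d => pvCharKey d == pvCharKey c) = (fun d => pvCharKey c == pvCharKey d) := by
        funext d; exact pvBeqComm _ _
      simp [pvG_cons, hfun, hpk]

lemma pvA_cons (c : Char) (cs : List Char) :
    pvRuns (pvCharKey c) [c] cs = pvG (c :: cs) := by
  rw [pvRuns_eq_groupBy cs [c] (pvCharKey c), pvG_cons]
  have hfun : (fun d => pvCharKey d == pvCharKey c) = (fun d => pvCharKey c == pvCharKey d) := by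
    funext d; exact pvBeqComm _ _
  simp [hfun]

-- B-side: folding pvStepB from the right produces exactly the run decomposition
lemma pvB_foldr (l : List Char) : l.foldr (fun c acc => pvStepB acc c) [] = pvG l := by
  induction l with
  | nil => simp [pvG_nil]
  | cons c cs ih =>
    rw [List.foldr_cons, ih]
    cases cs with
    | nil => simp [pvG_nil, pvG_cons, pvStepB]
    | cons d ds =>
      by_cases hdc : pvCharKey d == pvCharKey c
      · have hdk : pvCharKey d = pvCharKey c := eq_of_beq hdc
        have hfun : (fun e => pvCharKey e == pvCharKey d) = (fun e => pvCharKey e == pvCharKey c) := by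
          funext e; rw [hdk]
        simp [pvG_cons, pvStepB, hdk]
      · simp [pvG_cons, pvStepB, hdc]

-- ===== VERDICT (by name: the statement is the Claim_ definition above) =====
theorem separate_printable_and_nonprintable_py_spec : Claim_equal_separate_printable_and_nonprintable_py := by
  intro text _
  unfold Spec_separate_printable_and_nonprintable_py
  unfold separate_printable_and_nonprintable_py separate_printable_and_nonprintable_py_alt
  rw [List.foldl_reverse, pvB_foldr]
  cases h : text.toList with
  | nil => simp [pvG_nil]
  | cons c cs =>
    rw [if_neg (by simp)]
    rw [List.foldl_cons]
    show pvFinA (cs.foldl pvStepA (pvStepA ([], [], none) c)) = _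
    rw [show pvStepA ([], [], none) c = ([], [c], some (pvCharKey c)) from rfl]
    rw [pvA_loop cs [] [c] (pvCharKey c) (by simp)]
    rw [pvA_cons]
    simp
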